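-- pv_equiv track=rewrite | github.com/dasmiq/passim | scripts/seriatim.py | getPostings
-- ===== SOURCE A (Python) =====
-- from collections import Counter, deque
--
-- def getPostings(text, n, floating_ngrams):
--     tf = dict()
--     posts = list()
--     start = deque([], maxlen=n)
--     chars = deque([], maxlen=n)
--     for i, c in enumerate(text):
--         if c.isalnum():
--             prev = start[0] if len(start) == n else -2
--             start.append(i)
--             chars.append(c.lower())
--             if len(chars) == n and ( floating_ngrams or (start[0] - prev) > 1 ):
--                 key = ''.join(chars)
--                 val = tf.get(key, 0) + 1
--                 tf[key] = val
--                 if val == 1: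
--                     posts.append((key, start[0]))
--     return [(key, i) for key, i in posts if tf[key] == 1]
-- ===== SOURCE B (Python) =====
-- from collections import Counter
--
-- def getPostings(text, n, floating_ngrams):
--     # Stage 1: positions and lowercased spelling of the alphanumeric characters.
--     pos = [i for i, c in enumerate(text) if c.isalnum()]
--     chars = ''.join(c.lower() for c in text if c.isalnum())
--     # Stage 2: all windows passing the boundary gate, as (key, start) pairs.
--     gated = [(chars[i:i + n], pos[i])
--              for i in range(len(chars) - n + 1)
--              if floating_ngrams or i == 0 or pos[i] - pos[i - 1] > 1]
--     # Stage 3: a key is posted iff it is gated exactly once.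
--     counts = Counter(k for k, _ in gated)
--     return [(k, p) for k, p in gated if counts[k] == 1]
-- ===== Notes on version B (the rewrite author's own statement) =====
-- stated objective: alternative
-- what changed: Replaces A's single online pass with rolling deques, incremental tf counting and first-occurrence posting by three staged declarative passes: list all gate-passing (key,start) windows by index, count keys with one Counter, and keep exactly the windows whose key is gated once (correct because a key with total count 1 occurs only once, so A's first-occurrence dedup is vacuous for the surviving keys).
-- outside the precondition, e.g. on getPostings('', 0, False): A returns [], B raises IndexError
import Mathlib
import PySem

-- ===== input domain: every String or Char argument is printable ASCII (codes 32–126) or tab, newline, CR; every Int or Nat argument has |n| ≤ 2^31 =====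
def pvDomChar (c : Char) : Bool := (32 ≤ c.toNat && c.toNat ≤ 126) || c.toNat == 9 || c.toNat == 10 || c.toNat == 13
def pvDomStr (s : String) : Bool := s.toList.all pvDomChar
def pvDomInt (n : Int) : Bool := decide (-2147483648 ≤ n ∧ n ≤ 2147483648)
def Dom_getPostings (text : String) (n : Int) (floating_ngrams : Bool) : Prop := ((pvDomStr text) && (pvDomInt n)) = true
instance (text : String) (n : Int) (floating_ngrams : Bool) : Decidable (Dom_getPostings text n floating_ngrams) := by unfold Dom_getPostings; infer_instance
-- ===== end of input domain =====

-- B replaces A's single online pass (rolling deques, incremental tf dict, first-occurrence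
-- posting) by three staged passes: list every gate-passing (key, start) window, count keys
-- with one Counter, keep the windows whose key is gated exactly once (objective: alternative).

-- ===== PORT A =====
-- deque.append on a deque with maxlen n (exact whenever l.length ≤ n, the loop invariant; Pre_ gives 1 ≤ n)
def dqPush (n : Int) (l : List Int) (x : Int) : List Int :=
  if (l.length : Int) = n then l.tail ++ [x] else l ++ [x]

def dqPushC (n : Int) (l : List Char) (x : Char) : List Char :=
  if (l.length : Int) = n then l.tail ++ [x] else l ++ [x]

-- the body of A's 'for' loop for an alphanumeric character (q = (i, c.lower()))
def stepA (n : Int) (fl : Bool)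
    (st : PySem.Dict String Int × List (String × Int) × List Int × List Char)
    (q : Int × Char) :
    PySem.Dict String Int × List (String × Int) × List Int × List Char :=
  match st with
  | (tf, posts, start, chars) =>
    let prev : Int := if (start.length : Int) = n then start.headD 0 else -2
    let start := dqPush n start q.1
    let chars := dqPushC n chars q.2
    if (chars.length : Int) = n ∧ (fl = true ∨ start.headD 0 - prev > 1) then
      let key := String.ofList chars
      let val := tf.getD key 0 + 1
      let tf := tf.insert key val
      let posts := if val = 1 then posts ++ [(key, start.headD 0)] else posts
      (tf, posts, start, chars)
    else (tf, posts, start, chars)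

def getPostings (text : String) (n : Int) (floating_ngrams : Bool) : List (String × Int) :=
  let st := (PySem.List.enumerate text.toList 0).foldl
    (fun st p => if PySem.Chars.isalnum p.2 then stepA n floating_ngrams st (p.1, PySem.Chars.lowerChar p.2) else st)
    (PySem.Dict.empty, [], [], [])
  (st.2.1).filter (fun q => decide (st.1.getD q.1 0 = 1))

-- ===== PORT B =====
def getPostings_alt (text : String) (n : Int) (floating_ngrams : Bool) : List (String × Int) :=
  -- Stage 1: positions and lowercased spelling of the alphanumeric characters.
  let pos : List Int := (PySem.List.enumerate text.toList 0).filterMap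
    (fun p => if PySem.Chars.isalnum p.2 then some p.1 else none)
  let chars : List Char := (text.toList.filter (fun c => PySem.Chars.isalnum c)).map PySem.Chars.lowerChar
  -- Stage 2: all windows passing the boundary gate, as (key, start) pairs.
  let gated : List (String × Int) := (PySem.List.pyRange 0 ((chars.length : Int) - n + 1) 1).filterMap
    (fun i =>
      if floating_ngrams = true ∨ i = 0 ∨ (PySem.List.pyGet? pos i).getD 0 - (PySem.List.pyGet? pos (i - 1)).getD 0 > 1
      then some (String.ofList (PySem.List.slice chars (some i) (some (i + n))), (PySem.List.pyGet? pos i).getD 0)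
      else none)
  -- Stage 3: a key is posted iff it is gated exactly once.
  let counts : PySem.Dict String Int := PySem.Dict.counter (gated.map Prod.fst)
  gated.filter (fun q => decide (counts.getD q.1 0 = 1))

-- ===== PRECONDITION & SPEC =====
-- Pre_ excludes n ≤ 0, on which A raises: ValueError for n < 0 (deque maxlen), IndexError for
-- n = 0 once an alphanumeric character occurs; A returns only the degenerate [] when n = 0 and
-- the text has no alphanumeric character, where B naturally raises.
def Pre_getPostings (text : String) (n : Int) (floating_ngrams : Bool) : Prop := 1 ≤ n
instance (text : String) (n : Int) (floating_ngrams : Bool) : Decidable (Pre_getPostings text n floating_ngrams) := by unfold Pre_getPostings; infer_instance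
def pvWitness_getPostings : String × Int × Bool := ("ab ba ab", 2, false)

def Spec_getPostings (text : String) (n : Int) (floating_ngrams : Bool) (out : List (String × Int)) : Prop := out = getPostings_alt text n floating_ngrams
instance (text : String) (n : Int) (floating_ngrams : Bool) (out : List (String × Int)) : Decidable (Spec_getPostings text n floating_ngrams out) := by unfold Spec_getPostings; infer_instance

-- ===== CLAIM (what is proved, stated in full; the proofs are below) =====
def Claim_equal_getPostings : Prop := ∀ (text : String) (n : Int) (floating_ngrams : Bool), Dom_getPostings text n floating_ngrams → Pre_getPostings text n floating_ngrams → Spec_getPostings text n floating_ngrams (getPostings text n floating_ngrams)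

-- ===== LEMMAS AND PROOFS =====

-- the filtered (position, lowercased char) sequence both programs effectively work over
def pvSeq (text : String) : List (Int × Char) :=
  (PySem.List.enumerate text.toList 0).filterMap
    (fun p => if PySem.Chars.isalnum p.2 then some (p.1, PySem.Chars.lowerChar p.2) else none)

-- one gated-window step on the shared (tf, posts) state
def stepG (st : PySem.Dict String Int × List (String × Int)) (q : String × Int) :
    PySem.Dict String Int × List (String × Int) :=
  (st.1.insert q.1 (st.1.getD q.1 0 + 1),
   if st.1.getD q.1 0 + 1 = 1 then st.2 ++ [q] else st.2)

-- A's k-th window iteration (window ends at index k of pvSeq), proof-internal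
def stepW (seq : List (Int × Char)) (n : Int) (fl : Bool)
    (st : PySem.Dict String Int × List (String × Int)) (k : Int) :
    PySem.Dict String Int × List (String × Int) :=
  let start := ((PySem.List.pyGet? seq (k - n + 1)).getD (0, ' ')).1
  let prev : Int := if n ≤ k then ((PySem.List.pyGet? seq (k - n)).getD (0, ' ')).1 else -2
  if fl = true ∨ start - prev > 1 then
    let key := String.ofList ((PySem.List.slice seq (some (k - n + 1)) (some (k + 1))).map Prod.snd)
    let val := st.1.getD key 0 + 1
    (st.1.insert key val, if val = 1 then st.2 ++ [(key, start)] else st.2)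
  else st

-- A's loop skips non-alphanumeric characters, so it is the fold of stepA over pvSeq.
lemma foldl_skip_filterMap (n : Int) (fl : Bool)
    (l : List (Int × Char))
    (st : PySem.Dict String Int × List (String × Int) × List Int × List Char) :
    l.foldl (fun st p => if PySem.Chars.isalnum p.2 then stepA n fl st (p.1, PySem.Chars.lowerChar p.2) else st) st
      = (l.filterMap (fun p => if PySem.Chars.isalnum p.2 then some (p.1, PySem.Chars.lowerChar p.2) else none)).foldl (stepA n fl) st := by
  induction l generalizing st with
  | nil => rfl
  | cons p t ih =>
    by_cases h : PySem.Chars.isalnum p.2 <;> simp [h, ih]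

-- the sliding window after one more element
lemma win_succ (s : List (Int × Char)) (N m : Nat) (hN1 : 1 ≤ N) (hm : m < s.length) :
    (s.take (m+1)).drop (m+1 - N) =
      (if N ≤ m then ((s.take m).drop (m - N)).tail else (s.take m).drop (m - N)) ++ [s[m]] := by
  rw [List.take_succ_eq_append_getElem hm]
  split
  case isTrue h =>
    have h1 : m + 1 - N = (m - N) + 1 := by omega
    rw [h1, List.drop_append_of_le_length (by rw [List.length_take]; omega), List.tail_drop]
  case isFalse h =>
    have h1 : m + 1 - N = 0 := by omega
    have h2 : m - N = 0 := by omega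
    rw [h1, h2, List.drop_zero, List.drop_zero]

-- the head of a full window
lemma win_head (s : List (Int × Char)) (N m : Nat) (hN1 : 1 ≤ N) (hNm : N ≤ m) (hm : m ≤ s.length) :
    ((s.take m).drop (m - N)).head? = s[m - N]? := by
  rw [List.head?_eq_getElem?, List.getElem?_drop, Nat.add_zero,
    List.getElem?_take_of_lt (by omega)]

-- window length
lemma win_len (s : List (Int × Char)) (N m : Nat) (hm : m ≤ s.length) :
    ((s.take m).drop (m - N)).length = min m N := by
  simp [List.length_drop, List.length_take]; omega

-- one step of A's loop on an alphanumeric element, seen from the window invariant: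
-- it performs exactly the k = m window iteration (when the window is full) and advances the window.
lemma stepA_eval (N : Nat) (hN1 : 1 ≤ N) (fl : Bool) (s : List (Int × Char)) (m : Nat)
    (hm : m < s.length) (tf : PySem.Dict String Int) (posts : List (String × Int)) :
    stepA (N : Int) fl
      (tf, posts, ((s.take m).drop (m - N)).map Prod.fst, ((s.take m).drop (m - N)).map Prod.snd)
      s[m]
    = (let b := if N ≤ m + 1 then stepW s (N : Int) fl (tf, posts) (m : Int) else (tf, posts)
       (b.1, b.2, ((s.take (m+1)).drop (m+1 - N)).map Prod.fst,
         ((s.take (m+1)).drop (m+1 - N)).map Prod.snd)) := by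
  have hmle : m ≤ s.length := le_of_lt hm
  have hW1 := win_succ s N m hN1 hm
  have hWlen := win_len s N m hmle
  simp only [stepA, stepW, dqPush, dqPushC, List.length_map, hWlen]
  by_cases hNm : N ≤ m
  · have hNm1 : N ≤ m + 1 := by omega
    have e1 : ((m:Int) - (N:Int) + 1) = ((m + 1 - N : Nat) : Int) := by omega
    have e2 : ((m:Int) + 1) = ((m + 1 : Nat) : Int) := by omega
    have e3 : ((m:Int) - (N:Int)) = ((m - N : Nat) : Int) := by omega
    have hidx1 : m + 1 - N < s.length := by omega
    have hidx2 : m - N < s.length := by omega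
    rw [if_pos (by omega : ((min m N : Nat) : Int) = (N : Int)),
        if_pos (by omega : ((min m N : Nat) : Int) = (N : Int)),
        if_pos (by omega : ((min m N : Nat) : Int) = (N : Int))]
    have hw1f : (List.map Prod.fst (List.drop (m - N) (List.take m s))).tail ++ [s[m].1]
        = List.map Prod.fst (List.drop (m + 1 - N) (List.take (m + 1) s)) := by
      rw [hW1, if_pos hNm, List.map_append, List.map_tail]; rfl
    have hw1s : (List.map Prod.snd (List.drop (m - N) (List.take m s))).tail ++ [s[m].2]
        = List.map Prod.snd (List.drop (m + 1 - N) (List.take (m + 1) s)) := by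
      rw [hW1, if_pos hNm, List.map_append, List.map_tail]; rfl
    have hlen1 : (List.drop (m + 1 - N) (List.take (m + 1) s)).length = N := by
      rw [win_len s N (m + 1) (by omega)]; omega
    have hhead1 : (List.drop (m + 1 - N) (List.take (m + 1) s)).head? = some (s[m + 1 - N]'hidx1) := by
      rw [win_head s N (m + 1) hN1 hNm1 (by omega)]
      exact List.getElem?_eq_getElem hidx1
    have hhead0 : (List.drop (m - N) (List.take m s)).head? = some (s[m - N]'hidx2) := by
      rw [win_head s N m hN1 hNm hmle]
      exact List.getElem?_eq_getElem hidx2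
    have hget1 : PySem.List.pyGet? s ((m:Int) - (N:Int) + 1) = some (s[m + 1 - N]'hidx1) := by
      rw [e1, PySem.List.pyGet?_natCast]
      exact List.getElem?_eq_getElem hidx1
    have hget0 : PySem.List.pyGet? s ((m:Int) - (N:Int)) = some (s[m - N]'hidx2) := by
      rw [e3, PySem.List.pyGet?_natCast]
      exact List.getElem?_eq_getElem hidx2
    have hsl : PySem.List.slice s (some ((m:Int) - (N:Int) + 1)) (some ((m:Int) + 1))
        = List.drop (m + 1 - N) (List.take (m + 1) s) := by
      rw [e1, e2, PySem.List.slice_natCast, List.drop_take]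
    rw [hw1f, hw1s, hsl, hget1, hget0,
        if_pos (by exact_mod_cast hNm : ((N:Int) ≤ (m:Int)))]
    simp only [List.headD_eq_head?_getD, List.head?_map, hhead1, hhead0, Option.map_some,
      Option.getD_some]
    simp only [List.length_map, hlen1, true_and, if_pos hNm1]
    split_ifs <;> rfl
  · have hc : ¬ (((min m N : Nat) : Int) = (N : Int)) := by omega
    rw [if_neg hc, if_neg hc, if_neg hc]
    have hw1f : List.map Prod.fst (List.drop (m - N) (List.take m s)) ++ [s[m].1]
        = List.map Prod.fst (List.drop (m + 1 - N) (List.take (m + 1) s)) := by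
      rw [hW1, if_neg hNm, List.map_append]; rfl
    have hw1s : List.map Prod.snd (List.drop (m - N) (List.take m s)) ++ [s[m].2]
        = List.map Prod.snd (List.drop (m + 1 - N) (List.take (m + 1) s)) := by
      rw [hW1, if_neg hNm, List.map_append]; rfl
    rw [hw1f, hw1s]
    by_cases hfull : N ≤ m + 1
    · have e1 : ((m:Int) - (N:Int) + 1) = ((m + 1 - N : Nat) : Int) := by omega
      have e2 : ((m:Int) + 1) = ((m + 1 : Nat) : Int) := by omega
      have hidx1 : m + 1 - N < s.length := by omega
      have hlen1 : (List.drop (m + 1 - N) (List.take (m + 1) s)).length = N := by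
        rw [win_len s N (m + 1) (by omega)]; omega
      have hhead1 : (List.drop (m + 1 - N) (List.take (m + 1) s)).head? = some (s[m + 1 - N]'hidx1) := by
        rw [win_head s N (m + 1) hN1 hfull (by omega)]
        exact List.getElem?_eq_getElem hidx1
      have hget1 : PySem.List.pyGet? s ((m:Int) - (N:Int) + 1) = some (s[m + 1 - N]'hidx1) := by
        rw [e1, PySem.List.pyGet?_natCast]
        exact List.getElem?_eq_getElem hidx1
      have hsl : PySem.List.slice s (some ((m:Int) - (N:Int) + 1)) (some ((m:Int) + 1))
          = List.drop (m + 1 - N) (List.take (m + 1) s) := by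
        rw [e1, e2, PySem.List.slice_natCast, List.drop_take]
      rw [if_pos hfull, hsl, hget1,
          if_neg (by exact_mod_cast hNm : ¬ ((N:Int) ≤ (m:Int)))]
      simp only [List.headD_eq_head?_getD, List.head?_map, hhead1, Option.map_some,
        Option.getD_some, List.length_map, hlen1, true_and]
      split_ifs <;> rfl
    · have hlen1 : (List.drop (m + 1 - N) (List.take (m + 1) s)).length = m + 1 := by
        rw [win_len s N (m + 1) (by omega)]; omega
      rw [if_neg (fun h => hfull (by
            rw [List.length_map, hlen1] at h
            have : m + 1 = N := by exact_mod_cast h.1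
            omega)),
          if_neg hfull]

-- the main loop invariant: after A has consumed m elements of pvSeq, its window holds the last
-- min(m, n) elements and its (tf, posts) equal the fold of stepW over the indices n-1 ≤ k < m.
lemma loop_eq (N : Nat) (hN1 : 1 ≤ N) (fl : Bool) (s : List (Int × Char)) :
    ∀ (suf : List (Int × Char)) (m : Nat), s.drop m = suf →
    ∀ (tf : PySem.Dict String Int) (posts : List (String × Int)),
      (let a := List.foldl (stepA (N : Int) fl)
          (tf, posts, (((s.take m).drop (m - N)).map Prod.fst),
            (((s.take m).drop (m - N)).map Prod.snd)) suf
       (a.1, a.2.1))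
      = List.foldl (stepW s (N : Int) fl) (tf, posts)
          (PySem.List.pyRange (max ((N : Int) - 1) (m : Int)) (s.length : Int) 1) := by
  intro suf
  induction suf with
  | nil =>
    intro m h tf posts
    have hlen : s.length ≤ m := by
      have := congrArg List.length h
      simp [List.length_drop] at this
      omega
    rw [PySem.List.pyRange_one_eq_nil (by omega)]
    rfl
  | cons q rest ih =>
    intro m h tf posts
    have hm : m < s.length := by
      by_contra hc
      rw [List.drop_eq_nil_iff.mpr (by omega)] at h
      cases h
    rw [List.drop_eq_getElem_cons hm] at h
    injection h with hq hrest
    subst hq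
    simp only [List.foldl_cons]
    rw [stepA_eval N hN1 fl s m hm tf posts]
    by_cases hfull : N ≤ m + 1
    · have hmax1 : max ((N : Int) - 1) (m : Int) = (m : Int) := by omega
      have hmax2 : max ((N : Int) - 1) ((m + 1 : Nat) : Int) = ((m + 1 : Nat) : Int) := by push_cast; omega
      rw [hmax1, PySem.List.pyRange_one_cons (by exact_mod_cast hm), List.foldl_cons]
      have := ih (m + 1) hrest (stepW s (N : Int) fl (tf, posts) (m : Int)).1
        (stepW s (N : Int) fl (tf, posts) (m : Int)).2
      rw [hmax2] at this
      simpa [hfull] using this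
    · have hmax1 : max ((N : Int) - 1) (m : Int) = (N : Int) - 1 := by omega
      have hmax2 : max ((N : Int) - 1) ((m + 1 : Nat) : Int) = (N : Int) - 1 := by push_cast; omega
      rw [hmax1]
      have := ih (m + 1) hrest tf posts
      rw [hmax2] at this
      simpa [hfull] using this

-- positions in pvSeq are the positions list of B, chars its spelling, all positions ≥ 0
lemma pvSeq_fst (tl : List Char) (s : Int) :
    (PySem.List.enumerate tl s).filterMap (fun p => if PySem.Chars.isalnum p.2 then some p.1 else none)
    = ((PySem.List.enumerate tl s).filterMap (fun p => if PySem.Chars.isalnum p.2 then some (p.1, PySem.Chars.lowerChar p.2) else none)).map Prod.fst := by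
  induction tl generalizing s with
  | nil => rfl
  | cons c t ih =>
    rw [PySem.List.enumerate_cons]
    by_cases h : PySem.Chars.isalnum c <;> simp [h, ih]

lemma pvSeq_snd (tl : List Char) (s : Int) :
    (tl.filter (fun c => PySem.Chars.isalnum c)).map PySem.Chars.lowerChar
    = ((PySem.List.enumerate tl s).filterMap (fun p => if PySem.Chars.isalnum p.2 then some (p.1, PySem.Chars.lowerChar p.2) else none)).map Prod.snd := by
  induction tl generalizing s with
  | nil => rfl
  | cons c t ih =>
    rw [PySem.List.enumerate_cons]
    by_cases h : PySem.Chars.isalnum c <;> simp [h, ih (s+1)]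

lemma pvSeq_nonneg (text : String) : ∀ p ∈ pvSeq text, 0 ≤ p.1 := by
  intro p hp
  unfold pvSeq at hp
  obtain ⟨a, ha, hpa⟩ := List.mem_filterMap.mp hp
  rw [PySem.List.mem_enumerate_iff] at ha
  obtain ⟨k, hk, rfl⟩ := ha
  by_cases h : PySem.Chars.isalnum text.toList[k]
  · rw [if_pos h] at hpa
    injection hpa with hpa
    rw [← hpa]
    simp
  · rw [if_neg h] at hpa
    cases hpa

-- folding a gated body equals folding stepG over the gated windows
lemma foldl_gate_filterMap {α : Type} (P : α → Prop) [DecidablePred P]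
    (h : α → String × Int)
    (l : List α) (st : PySem.Dict String Int × List (String × Int)) :
    l.foldl (fun st k => if P k then stepG st (h k) else st) st
      = (l.filterMap (fun k => if P k then some (h k) else none)).foldl stepG st := by
  induction l generalizing st with
  | nil => rfl
  | cons a t ih =>
    by_cases hp : P a <;> simp [hp, ih]

-- the dict component of a stepG fold is the running counter of the keys
lemma fold_fst (G : List (String × Int)) :
    ∀ (d : PySem.Dict String Int) (ps : List (String × Int)),
    (G.foldl stepG (d, ps)).1
      = (G.map Prod.fst).foldl (fun d k => d.insert k (d.getD k 0 + 1)) d := by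
  induction G with
  | nil => intro d ps; rfl
  | cons q t ih =>
    intro d ps
    simp only [List.foldl_cons, List.map_cons, stepG]
    exact ih _ _

lemma fold_getD (G : List (String × Int)) (d : PySem.Dict String Int)
    (ps : List (String × Int)) (k : String) :
    (G.foldl stepG (d, ps)).1.getD k 0 = d.getD k 0 + ((G.map Prod.fst).count k : Int) := by
  rw [fold_fst]
  exact PySem.Dict.getD_foldl_insert_add_one _ _ _

-- the unique-key filter of the posted first occurrences is the unique-key filter of all windows
lemma fold_posts_filter (G : List (String × Int)) :
    ∀ (d : PySem.Dict String Int) (ps : List (String × Int)),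
    (∀ k, 0 ≤ d.getD k 0) →
    (G.foldl stepG (d, ps)).2.filter (fun q => decide ((G.foldl stepG (d, ps)).1.getD q.1 0 = 1))
      = ps.filter (fun q => decide ((G.foldl stepG (d, ps)).1.getD q.1 0 = 1))
        ++ G.filter (fun q => decide (d.getD q.1 0 + ((G.map Prod.fst).count q.1 : Int) = 1)) := by
  induction G with
  | nil => intro d ps _; simp
  | cons q t ih =>
    intro d ps hnn
    have hstep : (q :: t).foldl stepG (d, ps) = t.foldl stepG (stepG (d, ps) q) := rfl
    have hnn' : ∀ k, 0 ≤ (d.insert q.1 (d.getD q.1 0 + 1)).getD k 0 := by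
      intro k
      rcases eq_or_ne k q.1 with hk | hk
      · rw [hk, PySem.Dict.getD_insert_self]; have := hnn q.1; omega
      · rw [PySem.Dict.getD_insert_of_ne _ _ _ hk]; exact hnn k
    have htail : t.filter (fun x => decide ((d.insert q.1 (d.getD q.1 0 + 1)).getD x.1 0 + ((t.map Prod.fst).count x.1 : Int) = 1))
        = t.filter (fun x => decide (d.getD x.1 0 + (((q :: t).map Prod.fst).count x.1 : Int) = 1)) := by
      apply List.filter_congr
      intro x hx
      rcases eq_or_ne x.1 q.1 with hxq | hxq
      · rw [hxq, PySem.Dict.getD_insert_self]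
        simp [List.count_cons]
        omega
      · rw [PySem.Dict.getD_insert_of_ne _ _ _ hxq]
        simp [List.count_cons, Ne.symm hxq]
    by_cases hv : d.getD q.1 0 + 1 = 1
    · -- q's key unseen so far: q is posted
      have hq0 : d.getD q.1 0 = 0 := by omega
      have hsg : stepG (d, ps) q = (d.insert q.1 (d.getD q.1 0 + 1), ps ++ [q]) := by
        simp [stepG, hv]
      rw [hstep, hsg, ih _ (ps ++ [q]) hnn']
      have hF : (t.foldl stepG (d.insert q.1 (d.getD q.1 0 + 1), ps ++ [q])).1.getD q.1 0
          = 1 + ((t.map Prod.fst).count q.1 : Int) := by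
        rw [fold_getD, PySem.Dict.getD_insert_self, hq0]; ring
      rw [List.filter_append, List.append_assoc]
      congr 1
      rw [List.filter_cons, List.filter_cons, List.filter_nil, hF, htail]
      by_cases hz : (t.map Prod.fst).count q.1 = 0
      · rw [if_pos (by simp [hz]), if_pos (by simp [hq0, List.count_cons, hz])]
        rfl
      · rw [if_neg (by simp; omega), if_neg (by simp [hq0, List.count_cons]; omega)]
        rfl
    · -- q's key already counted: q is not posted, and its total count can not be 1
      have hq1 : 1 ≤ d.getD q.1 0 := by have := hnn q.1; omega
      have hsg : stepG (d, ps) q = (d.insert q.1 (d.getD q.1 0 + 1), ps) := by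
        simp [stepG, hv]
      rw [hstep, hsg, ih _ ps hnn']
      rw [List.filter_cons]
      rw [if_neg (by simp [List.count_cons]; omega)]
      rw [htail]

-- A's window iteration is a gated stepG
lemma stepW_eq_gate (s : List (Int × Char)) (n : Int) (fl : Bool)
    (st : PySem.Dict String Int × List (String × Int)) (k : Int) :
    stepW s n fl st k =
      if fl = true ∨ ((PySem.List.pyGet? s (k - n + 1)).getD (0, ' ')).1 -
          (if n ≤ k then ((PySem.List.pyGet? s (k - n)).getD (0, ' ')).1 else -2) > 1 then
        stepG st
          (String.ofList ((PySem.List.slice s (some (k - n + 1)) (some (k + 1))).map Prod.snd),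
           ((PySem.List.pyGet? s (k - n + 1)).getD (0, ' ')).1)
      else st := by
  unfold stepW stepG
  dsimp only

-- the gated windows of A, reindexed by their start, are exactly B's gated list
lemma gated_eq (text : String) (N : Nat) (hN1 : 1 ≤ N) (fl : Bool) :
    (PySem.List.pyRange ((N : Int) - 1) ((pvSeq text).length : Int) 1).filterMap
      (fun k => if fl = true ∨ ((PySem.List.pyGet? (pvSeq text) (k - (N:Int) + 1)).getD (0, ' ')).1 -
            (if (N:Int) ≤ k then ((PySem.List.pyGet? (pvSeq text) (k - (N:Int))).getD (0, ' ')).1 else -2) > 1 then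
          some (String.ofList ((PySem.List.slice (pvSeq text) (some (k - (N:Int) + 1)) (some (k + 1))).map Prod.snd),
            ((PySem.List.pyGet? (pvSeq text) (k - (N:Int) + 1)).getD (0, ' ')).1)
        else none)
    = (PySem.List.pyRange 0 ((((pvSeq text).map Prod.snd).length : Int) - (N:Int) + 1) 1).filterMap
      (fun i =>
        if fl = true ∨ i = 0 ∨ (PySem.List.pyGet? ((pvSeq text).map Prod.fst) i).getD 0 -
            (PySem.List.pyGet? ((pvSeq text).map Prod.fst) (i - 1)).getD 0 > 1
        then some (String.ofList (PySem.List.slice ((pvSeq text).map Prod.snd) (some i) (some (i + (N:Int)))),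
          (PySem.List.pyGet? ((pvSeq text).map Prod.fst) i).getD 0)
        else none) := by
  set s := pvSeq text with hs
  have hL : (((s.map Prod.snd)).length : Int) = (s.length : Int) := by simp
  rw [hL]
  have hM : ((s.length : Int) - ((N:Int) - 1)).toNat = ((s.length : Int) - (N:Int) + 1 - 0).toNat := by omega
  rw [PySem.List.pyRange_one ((N:Int) - 1), PySem.List.pyRange_one 0, hM,
    List.filterMap_map, List.filterMap_map]
  apply List.filterMap_congr
  intro j hj
  rw [List.mem_range] at hj
  have hjL : j < s.length := by omega
  have hjN : (j : Int) < (s.length : Int) - (N:Int) + 1 := by omega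
  simp only [Function.comp]
  -- index arithmetic
  have e1 : ((N:Int) - 1 + (j:Int)) - (N:Int) + 1 = (j : Int) := by ring
  have e2 : ((N:Int) - 1 + (j:Int)) + 1 = (j : Int) + (N:Int) := by ring
  have e3 : ((N:Int) - 1 + (j:Int)) - (N:Int) = (j : Int) - 1 := by ring
  have e0 : (0 : Int) + (j:Int) = (j : Int) := by ring
  rw [e0]
  -- start values agree
  have hget : PySem.List.pyGet? s (j : Int) = some (s[j]'hjL) := by
    rw [PySem.List.pyGet?_natCast]; exact List.getElem?_eq_getElem hjL
  have hgetf : PySem.List.pyGet? (s.map Prod.fst) (j : Int) = some ((s[j]'hjL).1) := by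
    rw [PySem.List.pyGet?_natCast, List.getElem?_map, List.getElem?_eq_getElem hjL]; rfl
  -- keys agree
  have hkey : (PySem.List.slice s (some (j:Int)) (some ((N:Int) - 1 + (j:Int) + 1))).map Prod.snd
      = PySem.List.slice (s.map Prod.snd) (some (j:Int)) (some ((j:Int) + (N:Int))) := by
    rw [e2, PySem.List.slice_natCast_add, PySem.List.slice_natCast_add,
      List.map_take, List.map_drop]
  -- previous-position values agree (j ≥ 1) / gate trivial (j = 0)
  by_cases hj0 : j = 0
  · subst hj0
    have hprevc : ¬ ((N:Int) ≤ (N:Int) - 1 + ((0:Nat):Int)) := by push_cast; omega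
    have h0 : 0 ≤ (s[(0:Nat)]'hjL).1 := pvSeq_nonneg text _ (List.getElem_mem hjL)
    rw [e1, hget, if_neg hprevc, hgetf]
    simp only [Option.getD_some]
    rw [if_pos (by right; omega), if_pos (by right; left; rfl), hkey]
  · have hj1 : 1 ≤ j := by omega
    have hprevc : (N:Int) ≤ (N:Int) - 1 + (j:Nat) := by omega
    have ej1 : (j : Int) - 1 = ((j - 1 : Nat) : Int) := by omega
    have hj1L : j - 1 < s.length := by omega
    have hgetp : PySem.List.pyGet? s ((j:Int) - 1) = some (s[j-1]'hj1L) := by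
      rw [ej1, PySem.List.pyGet?_natCast]; exact List.getElem?_eq_getElem hj1L
    have hgetpf : PySem.List.pyGet? (s.map Prod.fst) ((j:Int) - 1) = some ((s[j-1]'hj1L).1) := by
      rw [ej1, PySem.List.pyGet?_natCast, List.getElem?_map, List.getElem?_eq_getElem hj1L]; rfl
    rw [e1, e3, hget, if_pos hprevc, hgetp, hgetf, hgetpf]
    simp only [Option.getD_some]
    have hiff : (fl = true ∨ (s[j]'hjL).1 - (s[j-1]'hj1L).1 > 1) ↔
        (fl = true ∨ (j:Int) = 0 ∨ (s[j]'hjL).1 - (s[j-1]'hj1L).1 > 1) := by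
      constructor
      · rintro (h | h)
        · exact Or.inl h
        · exact Or.inr (Or.inr h)
      · rintro (h | h | h)
        · exact Or.inl h
        · exact absurd h (by exact_mod_cast hj0)
        · exact Or.inr h
    rw [hkey, if_congr hiff rfl rfl]

-- specializations naming the shared sequence
lemma pos_eq (text : String) :
    (PySem.List.enumerate text.toList 0).filterMap (fun p => if PySem.Chars.isalnum p.2 then some p.1 else none)
      = (pvSeq text).map Prod.fst := pvSeq_fst text.toList 0

lemma chars_eq (text : String) :
    (text.toList.filter (fun c => PySem.Chars.isalnum c)).map PySem.Chars.lowerChar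
      = (pvSeq text).map Prod.snd := pvSeq_snd text.toList 0

lemma seq_eq (text : String) :
    (PySem.List.enumerate text.toList 0).filterMap
      (fun p => if PySem.Chars.isalnum p.2 then some (p.1, PySem.Chars.lowerChar p.2) else none)
      = pvSeq text := rfl

theorem getPostings_eq_alt (text : String) (n : Int) (hn : 1 ≤ n) (fl : Bool) :
    getPostings text n fl = getPostings_alt text n fl := by
  obtain ⟨N, hN⟩ : ∃ N : Nat, n = (N : Int) := ⟨n.toNat, (Int.toNat_of_nonneg (by omega)).symm⟩
  subst hN
  have hN1 : 1 ≤ N := by exact_mod_cast hn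
  unfold getPostings getPostings_alt
  dsimp only
  rw [foldl_skip_filterMap, seq_eq, pos_eq, chars_eq]
  have h0 := loop_eq N hN1 fl (pvSeq text) (pvSeq text) 0 rfl PySem.Dict.empty []
  have hmax : max ((N : Int) - 1) ((0 : Nat) : Int) = (N : Int) - 1 := by push_cast; omega
  rw [hmax] at h0
  simp only [List.take_zero, List.drop_nil, Nat.zero_sub, List.map_nil] at h0
  have hstepW : stepW (pvSeq text) (N:Int) fl = fun st k =>
      if fl = true ∨ ((PySem.List.pyGet? (pvSeq text) (k - (N:Int) + 1)).getD (0, ' ')).1 -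
          (if (N:Int) ≤ k then ((PySem.List.pyGet? (pvSeq text) (k - (N:Int))).getD (0, ' ')).1 else -2) > 1 then
        stepG st
          (String.ofList ((PySem.List.slice (pvSeq text) (some (k - (N:Int) + 1)) (some (k + 1))).map Prod.snd),
           ((PySem.List.pyGet? (pvSeq text) (k - (N:Int) + 1)).getD (0, ' ')).1)
      else st := by
    funext st k; exact stepW_eq_gate _ _ _ _ _
  rw [hstepW, foldl_gate_filterMap, gated_eq text N hN1 fl] at h0
  have ha := congrArg Prod.fst h0
  have hb := congrArg Prod.snd h0
  dsimp only at ha hb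
  rw [ha, hb]
  rw [fold_posts_filter _ PySem.Dict.empty [] (fun k => by rw [PySem.Dict.getD_empty])]
  rw [List.filter_nil, List.nil_append]
  apply List.filter_congr
  intro x hx
  rw [PySem.Dict.getD_counter, PySem.Dict.getD_empty]
  simp

-- ===== VERDICT (by name: the statement is the Claim_ definition above) =====
theorem getPostings_spec : Claim_equal_getPostings := by
  intro text n fl _ hpre
  exact getPostings_eq_alt text n hpre fl
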